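-- pv_equiv track=rewrite | github.com/denis333rus/procuratyra | app.py | group_news_by_date
-- ===== SOURCE A (Python) =====
-- def group_news_by_date(items):
--     grouped = {}
--     for it in items:
--         grouped.setdefault(it['date'], []).append(it)
--     # сортировка дат по убыванию
--     ordered = []
--     for d in sorted(grouped.keys(), reverse=True):
--         # сортировка времени по убыванию
--         ordered.append((d, sorted(grouped[d], key=lambda x: x['time'], reverse=True)))
--     return ordered
-- ===== SOURCE B (Python) =====
-- def group_news_by_date(items):
--     # one stable sort by the composite key (date, time) descending,
--     # then a single linear scan that cuts the sorted list into date-runs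
--     ordered = sorted(items, key=lambda it: (it['date'], it['time']), reverse=True)
--     result = []
--     while ordered:
--         d = ordered[0]['date']
--         i = 1
--         while i < len(ordered) and ordered[i]['date'] == d:
--             i += 1
--         result.append((d, ordered[:i]))
--         ordered = ordered[i:]
--     return result
-- ===== Notes on version B (the rewrite author's own statement) =====
-- stated objective: alternative
-- what changed: Replaces A's dict-bucketing followed by a sort of the keys and a separate sort of every bucket with one stable composite-key sort (date, time) descending plus a single linear scan that cuts the sorted list into adjacent date-runs.
import Mathlib
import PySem

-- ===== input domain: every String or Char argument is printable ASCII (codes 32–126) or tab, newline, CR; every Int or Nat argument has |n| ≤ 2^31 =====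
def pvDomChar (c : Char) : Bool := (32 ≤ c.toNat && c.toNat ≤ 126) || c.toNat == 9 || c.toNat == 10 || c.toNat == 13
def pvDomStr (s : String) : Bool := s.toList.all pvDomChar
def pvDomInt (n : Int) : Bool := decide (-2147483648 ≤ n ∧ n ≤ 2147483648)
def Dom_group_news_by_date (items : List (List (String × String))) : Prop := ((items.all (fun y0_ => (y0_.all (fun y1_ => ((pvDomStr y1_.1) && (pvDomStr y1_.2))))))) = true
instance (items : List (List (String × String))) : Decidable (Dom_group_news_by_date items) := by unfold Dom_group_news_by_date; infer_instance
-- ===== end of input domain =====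

-- B replaces A's dict-bucketing + per-key/per-bucket sorts with one stable composite-key sort
-- followed by a linear scan cutting the sorted list into adjacent date-runs (alternative decomposition).

-- it['k'] on the dict `it` (association list, first match); total via getD "", Pre_ guarantees presence
def pvGetStr (it : List (String × String)) (k : String) : String :=
  ((PySem.Dict.mk it).get? k).getD ""

-- ===== PORT A =====
def group_news_by_date (items : List (List (String × String))) : List (String × (List (List (String × String)))) :=
  let grouped := items.foldl
    (fun d it => d.modify (pvGetStr it "date") [] (fun l => l ++ [it])) PySem.Dict.empty
  (PySem.List.sorted grouped.keys (fun c => c) true).foldl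
    (fun acc d => acc ++ [(d, PySem.List.sorted (grouped.getD d []) (fun x => pvGetStr x "time") true)]) []

-- ===== PORT B =====
-- the run-cutting scan of Source B: head's date, then the maximal prefix with the same date
def pvRuns : List (List (String × String)) → List (String × List (List (String × String)))
  | [] => []
  | it :: rest =>
    (pvGetStr it "date", it :: rest.takeWhile (fun x => pvGetStr x "date" == pvGetStr it "date")) ::
      pvRuns (rest.dropWhile (fun x => pvGetStr x "date" == pvGetStr it "date"))
termination_by l => l.length
decreasing_by simp only [List.length_cons]; exact Nat.lt_succ_of_le (List.length_dropWhile_le _ _)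

def group_news_by_date_alt (items : List (List (String × String))) : List (String × (List (List (String × String)))) :=
  pvRuns (PySem.List.sorted2 items (fun it => pvGetStr it "date") (fun it => pvGetStr it "time") true)

-- ===== PRECONDITION & SPEC =====
-- Pre_ excludes exactly the inputs where Python A raises KeyError: an item without a 'date' or 'time' key
def Pre_group_news_by_date (items : List (List (String × String))) : Prop :=
  ∀ it ∈ items, ((PySem.Dict.mk it).get? "date").isSome = true ∧ ((PySem.Dict.mk it).get? "time").isSome = true
instance (items : List (List (String × String))) : Decidable (Pre_group_news_by_date items) := by
  unfold Pre_group_news_by_date; infer_instance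

def pvWitness_group_news_by_date : (List (List (String × String))) :=
  [[("date", "2024-01-02"), ("time", "10:00")],
   [("date", "2024-01-01"), ("time", "09:30")],
   [("date", "2024-01-02"), ("time", "08:15")]]

def Spec_group_news_by_date (items : List (List (String × String))) (out : List (String × (List (List (String × String))))) : Prop := out = group_news_by_date_alt items
instance (items : List (List (String × String))) (out : List (String × (List (List (String × String))))) : Decidable (Spec_group_news_by_date items out) := by unfold Spec_group_news_by_date; infer_instance

-- ===== CLAIM (what is proved, stated in full; the proofs are below) =====
def Claim_equal_group_news_by_date : Prop := ∀ (items : List (List (String × String))), Dom_group_news_by_date items → Pre_group_news_by_date items → Spec_group_news_by_date items (group_news_by_date items)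

-- ===== LEMMAS AND PROOFS =====

-- descending 'before' predicates of PySem's reverse=True insertion sort
def pvDB {α : Type} (k : α → String) : α → α → Bool := fun a b => decide (k b < k a)
def pvDB2 {α : Type} (k1 k2 : α → String) : α → α → Bool :=
  fun a b => decide (k1 b < k1 a) || (!decide (k1 a < k1 b) && decide (k2 b < k2 a))

def pvKeys {α : Type} (k1 : α → String) (xs : List α) : List String :=
  PySem.List.sorted (PySem.Set.ofList (xs.map k1)) (fun c => c) true
def pvBucket {α : Type} (k1 k2 : α → String) (xs : List α) (c : String) : List α :=
  PySem.List.sorted (xs.filter (fun x => k1 x == c)) k2 true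

-- snoc unfoldings of the insertion sorts
theorem sorted_snoc {α : Type} (k : α → String) (l : List α) (x : α) :
    PySem.List.sorted (l ++ [x]) k true = PySem.List.insertBy (pvDB k) x (PySem.List.sorted l k true) := by
  have h : ∀ (m : List α), PySem.List.sorted m k true
      = List.foldl (fun acc y => PySem.List.insertBy (pvDB k) y acc) [] m := fun m => rfl
  rw [h, h, List.foldl_append, List.foldl_cons, List.foldl_nil]

theorem sorted2_snoc {α : Type} (k1 k2 : α → String) (l : List α) (x : α) :
    PySem.List.sorted2 (l ++ [x]) k1 k2 true
      = PySem.List.insertBy (pvDB2 k1 k2) x (PySem.List.sorted2 l k1 k2 true) := by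
  have h : ∀ (m : List α), PySem.List.sorted2 m k1 k2 true
      = List.foldl (fun acc y => PySem.List.insertBy (pvDB2 k1 k2) y acc) [] m := fun m => rfl
  rw [h, h, List.foldl_append, List.foldl_cons, List.foldl_nil]

theorem insertBy_append_false {α : Type} (before : α → α → Bool) (x : α) (B C : List α)
    (h : ∀ y ∈ B, before x y = false) :
    PySem.List.insertBy before x (B ++ C) = B ++ PySem.List.insertBy before x C := by
  induction B with
  | nil => simp
  | cons b B ih =>
    have hb := h b (by simp)
    simp [PySem.List.insertBy, hb, ih (fun y hy => h y (by simp [hy]))]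

theorem insertBy_all_true {α : Type} (before : α → α → Bool) (x : α) (C : List α)
    (h : ∀ y ∈ C, before x y = true) :
    PySem.List.insertBy before x C = x :: C := by
  cases C with
  | nil => simp [PySem.List.insertBy]
  | cons c C => simp [PySem.List.insertBy, h c (by simp)]

theorem insertBy_append_true {α : Type} (before : α → α → Bool) (x : α) (B C : List α)
    (h : ∀ y ∈ C, before x y = true) :
    PySem.List.insertBy before x (B ++ C) = PySem.List.insertBy before x B ++ C := by
  induction B with
  | nil => simp [PySem.List.insertBy, insertBy_all_true before x C h]
  | cons b B ih => by_cases hb : before x b <;> simp [PySem.List.insertBy, hb, ih]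

theorem insertBy_congr {α : Type} (f g : α → α → Bool) (x : α) (l : List α)
    (h : ∀ y ∈ l, f x y = g x y) :
    PySem.List.insertBy f x l = PySem.List.insertBy g x l := by
  induction l with
  | nil => rfl
  | cons b B ih =>
    have hb := h b (by simp)
    have ih' := ih (fun y hy => h y (by simp [hy]))
    by_cases hf : f x b
    · simp [PySem.List.insertBy, hf, hb ▸ hf]
    · have hf' : f x b = false := by simpa using hf
      have hg' : g x b = false := hb ▸ hf'
      simp [PySem.List.insertBy, hf', hg', ih']

theorem ofList_snoc {α : Type} [BEq α] (l : List α) (c : α) :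
    PySem.Set.ofList (l ++ [c]) = PySem.Set.add (PySem.Set.ofList l) c := by
  rw [PySem.Set.ofList_eq_foldl, List.foldl_append, ← PySem.Set.ofList_eq_foldl]
  rfl

theorem keys_pairwise {α : Type} (k1 : α → String) (xs : List α) :
    (pvKeys k1 xs).Pairwise (fun a b => b < a) := by
  have h1 := PySem.List.sorted_pairwise_rev (PySem.Set.ofList (xs.map k1)) (fun c => c)
  have h2 : (pvKeys k1 xs).Nodup :=
    (PySem.List.sorted_perm (PySem.Set.ofList (xs.map k1)) (fun c => c) true).nodup_iff.mpr
      (PySem.Set.nodup_ofList _)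
  exact (h1.and h2).imp (fun h => lt_of_le_of_ne h.1 (Ne.symm h.2))

theorem mem_keys {α : Type} (k1 : α → String) (xs : List α) (c : String) :
    c ∈ pvKeys k1 xs ↔ c ∈ xs.map k1 := by
  unfold pvKeys
  rw [PySem.List.mem_sorted, PySem.Set.mem_ofList]

theorem mem_bucket_key {α : Type} (k1 k2 : α → String) (xs : List α) (c : String) (y : α)
    (hy : y ∈ pvBucket k1 k2 xs c) : k1 y = c := by
  unfold pvBucket at hy
  rw [PySem.List.mem_sorted, List.mem_filter] at hy
  exact eq_of_beq hy.2

theorem bucket_ne_nil {α : Type} (k1 k2 : α → String) (xs : List α) (c : String)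
    (hc : c ∈ xs.map k1) : pvBucket k1 k2 xs c ≠ [] := by
  unfold pvBucket
  rw [Ne, PySem.List.sorted_eq_nil_iff, List.filter_eq_nil_iff]
  intro h
  obtain ⟨x, hx, rfl⟩ := List.mem_map.mp hc
  exact h x hx (by simp)

theorem dropWhile_lt (K : List String) (c0 : String)
    (hP : K.Pairwise (fun a b => b < a)) (hc : c0 ∉ K) :
    ∀ y ∈ K.dropWhile (fun y => decide (c0 < y)), y < c0 := by
  induction K with
  | nil => simp
  | cons k K ih =>
    by_cases hk : c0 < k
    · rw [List.dropWhile_cons_of_pos (by simpa using hk)]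
      exact ih (hP.tail) (fun h => hc (List.mem_cons_of_mem _ h))
    · rw [List.dropWhile_cons_of_neg (by simpa using hk)]
      intro y hy
      rcases List.mem_cons.mp hy with rfl | hy'
      · exact lt_of_le_of_ne (not_lt.mp hk) (fun h => hc (by simp [h]))
      · exact lt_of_lt_of_le (List.rel_of_pairwise_cons hP hy') (not_lt.mp hk)

theorem takeWhile_append_all {α : Type} (p : α → Bool) (a b : List α)
    (h : ∀ y ∈ a, p y = true) :
    List.takeWhile p (a ++ b) = a ++ List.takeWhile p b := by
  induction a with
  | nil => simp
  | cons z zs ih =>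
    rw [List.cons_append, List.takeWhile_cons_of_pos (h z (by simp)),
        ih (fun y hy => h y (by simp [hy])), List.cons_append]

theorem dropWhile_append_all {α : Type} (p : α → Bool) (a b : List α)
    (h : ∀ y ∈ a, p y = true) :
    List.dropWhile p (a ++ b) = List.dropWhile p b := by
  induction a with
  | nil => simp
  | cons z zs ih =>
    rw [List.cons_append, List.dropWhile_cons_of_pos (h z (by simp)),
        ih (fun y hy => h y (by simp [hy]))]

-- the stable-sort structure theorem: one composite-key descending sort is
-- the descending list of distinct primary keys with each bucket sorted by the secondary key
theorem sorted2_flatMap {α : Type} (k1 k2 : α → String) (xs : List α) :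
    PySem.List.sorted2 xs k1 k2 true = (pvKeys k1 xs).flatMap (pvBucket k1 k2 xs) := by
  induction xs using List.reverseRecOn with
  | nil => rfl
  | append_singleton l x ih =>
    have hP := keys_pairwise k1 l
    have hb2_gt : ∀ y : α, k1 x < k1 y → pvDB2 k1 k2 x y = false := by
      intro y h; simp [pvDB2, h, lt_asymm h]
    have hb2_lt : ∀ y : α, k1 y < k1 x → pvDB2 k1 k2 x y = true := by
      intro y h; simp [pvDB2, h]
    have hb2_eq : ∀ y : α, k1 y = k1 x → pvDB2 k1 k2 x y = pvDB k2 x y := by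
      intro y h; simp [pvDB2, pvDB, h]
    have hbucket_ne : ∀ c : String, c ≠ k1 x → pvBucket k1 k2 (l ++ [x]) c = pvBucket k1 k2 l c := by
      intro c hne
      unfold pvBucket
      have hx : ¬ (k1 x = c) := fun h => hne h.symm
      rw [List.filter_append]
      simp [hx]
    have hbucket_eq : pvBucket k1 k2 (l ++ [x]) (k1 x)
        = PySem.List.insertBy (pvDB k2) x (pvBucket k1 k2 l (k1 x)) := by
      unfold pvBucket
      rw [List.filter_append, show List.filter (fun y => k1 y == k1 x) [x] = [x] by simp,
          sorted_snoc]
    rw [sorted2_snoc, ih]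
    by_cases hc : k1 x ∈ l.map k1
    · -- the primary key of x already occurs in l
      have hkeys : pvKeys k1 (l ++ [x]) = pvKeys k1 l := by
        unfold pvKeys
        rw [List.map_append, List.map_singleton, ofList_snoc,
            PySem.Set.add_of_mem ((PySem.Set.mem_ofList _ _).mpr hc)]
      obtain ⟨pre, post, hK⟩ := List.append_of_mem ((mem_keys k1 l (k1 x)).mpr hc)
      have hPd := hK ▸ hP
      have hpre : ∀ c ∈ pre, k1 x < c := by
        intro c hcp
        exact (List.pairwise_append.mp hPd).2.2 c hcp (k1 x) (by simp)
      have hpost : ∀ c ∈ post, c < k1 x :=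
        fun c hcp => List.rel_of_pairwise_cons (List.pairwise_append.mp hPd).2.1 hcp
      have hfalse : ∀ y ∈ pre.flatMap (pvBucket k1 k2 l), pvDB2 k1 k2 x y = false := by
        intro y hy
        obtain ⟨c, hcp, hyc⟩ := List.mem_flatMap.mp hy
        have hk := mem_bucket_key k1 k2 l c y hyc
        exact hb2_gt y (by rw [hk]; exact hpre c hcp)
      have htrue : ∀ y ∈ post.flatMap (pvBucket k1 k2 l), pvDB2 k1 k2 x y = true := by
        intro y hy
        obtain ⟨c, hcp, hyc⟩ := List.mem_flatMap.mp hy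
        have hk := mem_bucket_key k1 k2 l c y hyc
        exact hb2_lt y (by rw [hk]; exact hpost c hcp)
      have hcongr : ∀ y ∈ pvBucket k1 k2 l (k1 x), pvDB2 k1 k2 x y = pvDB k2 x y :=
        fun y hy => hb2_eq y (mem_bucket_key k1 k2 l (k1 x) y hy)
      have hpreeq : ∀ c ∈ pre, pvBucket k1 k2 (l ++ [x]) c = pvBucket k1 k2 l c :=
        fun c hcp => hbucket_ne c (ne_of_gt (hpre c hcp))
      have hposteq : ∀ c ∈ post, pvBucket k1 k2 (l ++ [x]) c = pvBucket k1 k2 l c :=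
        fun c hcp => hbucket_ne c (ne_of_lt (hpost c hcp))
      rw [hkeys, hK]
      simp only [List.flatMap_append, List.flatMap_cons]
      rw [insertBy_append_false _ _ _ _ hfalse, insertBy_append_true _ _ _ _ htrue,
          insertBy_congr _ _ _ _ hcongr, ← hbucket_eq,
          List.flatMap_congr hpreeq, List.flatMap_congr hposteq]
    · -- fresh primary key
      have hcK : k1 x ∉ pvKeys k1 l := fun h => hc ((mem_keys k1 l (k1 x)).mp h)
      have hadd : PySem.Set.add (PySem.Set.ofList (l.map k1)) (k1 x)
          = PySem.Set.ofList (l.map k1) ++ [k1 x] := by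
        have hnm : k1 x ∉ PySem.Set.ofList (l.map k1) :=
          fun h => hc ((PySem.Set.mem_ofList _ _).mp h)
        simp [PySem.Set.add, PySem.Set.contains, hnm]
      have hpre : ∀ c ∈ (pvKeys k1 l).takeWhile (fun y => decide (k1 x < y)), k1 x < c :=
        fun c hcp => by simpa using List.mem_takeWhile_imp hcp
      have hpost : ∀ c ∈ (pvKeys k1 l).dropWhile (fun y => decide (k1 x < y)), c < k1 x :=
        dropWhile_lt _ _ hP hcK
      have hkeys : pvKeys k1 (l ++ [x])
          = (pvKeys k1 l).takeWhile (fun y => decide (k1 x < y))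
            ++ k1 x :: (pvKeys k1 l).dropWhile (fun y => decide (k1 x < y)) := by
        have h0 : pvKeys k1 (l ++ [x])
            = PySem.List.insertBy (pvDB (fun c => c)) (k1 x) (pvKeys k1 l) := by
          unfold pvKeys
          rw [List.map_append, List.map_singleton, ofList_snoc, hadd, sorted_snoc (fun c => c)]
        have hfK : ∀ y ∈ (pvKeys k1 l).takeWhile (fun y => decide (k1 x < y)),
            pvDB (fun c => c) (k1 x) y = false := by
          intro y hy
          simp [pvDB, lt_asymm (hpre y hy)]
        have htK : ∀ y ∈ (pvKeys k1 l).dropWhile (fun y => decide (k1 x < y)),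
            pvDB (fun c => c) (k1 x) y = true := by
          intro y hy
          simp [pvDB, hpost y hy]
        rw [h0]
        conv_lhs => rw [show pvKeys k1 l
              = (pvKeys k1 l).takeWhile (fun y => decide (k1 x < y))
                ++ (pvKeys k1 l).dropWhile (fun y => decide (k1 x < y))
            from (List.takeWhile_append_dropWhile).symm]
        rw [insertBy_append_false _ _ _ _ hfK, insertBy_all_true _ _ _ htK]
      have hbx : pvBucket k1 k2 (l ++ [x]) (k1 x) = [x] := by
        unfold pvBucket
        have h1 : List.filter (fun y => k1 y == k1 x) l = [] :=
          List.filter_eq_nil_iff.mpr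
            (fun y hy hb => hc (by
              rw [show k1 x = k1 y from (eq_of_beq hb).symm]
              exact List.mem_map_of_mem hy))
        rw [List.filter_append, h1, show List.filter (fun y => k1 y == k1 x) [x] = [x] by simp,
            List.nil_append]
        rfl
      have hfalse : ∀ y ∈ ((pvKeys k1 l).takeWhile (fun y => decide (k1 x < y))).flatMap (pvBucket k1 k2 l),
          pvDB2 k1 k2 x y = false := by
        intro y hy
        obtain ⟨c, hcp, hyc⟩ := List.mem_flatMap.mp hy
        have hk := mem_bucket_key k1 k2 l c y hyc
        exact hb2_gt y (by rw [hk]; exact hpre c hcp)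
      have htrue : ∀ y ∈ ((pvKeys k1 l).dropWhile (fun y => decide (k1 x < y))).flatMap (pvBucket k1 k2 l),
          pvDB2 k1 k2 x y = true := by
        intro y hy
        obtain ⟨c, hcp, hyc⟩ := List.mem_flatMap.mp hy
        have hk := mem_bucket_key k1 k2 l c y hyc
        exact hb2_lt y (by rw [hk]; exact hpost c hcp)
      have hpreeq : ∀ c ∈ (pvKeys k1 l).takeWhile (fun y => decide (k1 x < y)),
          pvBucket k1 k2 (l ++ [x]) c = pvBucket k1 k2 l c :=
        fun c hcp => hbucket_ne c (ne_of_gt (hpre c hcp))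
      have hposteq : ∀ c ∈ (pvKeys k1 l).dropWhile (fun y => decide (k1 x < y)),
          pvBucket k1 k2 (l ++ [x]) c = pvBucket k1 k2 l c :=
        fun c hcp => hbucket_ne c (ne_of_lt (hpost c hcp))
      rw [hkeys]
      conv_lhs => rw [show pvKeys k1 l
            = (pvKeys k1 l).takeWhile (fun y => decide (k1 x < y))
              ++ (pvKeys k1 l).dropWhile (fun y => decide (k1 x < y))
          from (List.takeWhile_append_dropWhile).symm]
      simp only [List.flatMap_append, List.flatMap_cons]
      rw [insertBy_append_false _ _ _ _ hfalse, insertBy_all_true _ _ _ htrue,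
          hbx, List.flatMap_congr hpreeq, List.flatMap_congr hposteq, List.singleton_append]

-- pvRuns over a flatMap of nonempty single-date blocks with distinct dates
theorem pvRuns_flatMap (ks : List String) (g : String → List (List (String × String)))
    (hnd : ks.Nodup)
    (hne : ∀ c ∈ ks, g c ≠ [])
    (hkey : ∀ c ∈ ks, ∀ y ∈ g c, pvGetStr y "date" = c) :
    pvRuns (ks.flatMap g) = ks.map (fun c => (c, g c)) := by
  induction ks with
  | nil => simp [pvRuns]
  | cons c ks ih =>
    obtain ⟨it, run0, hg⟩ : ∃ it run0, g c = it :: run0 := by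
      cases h : g c with
      | nil => exact absurd h (hne c (by simp))
      | cons a l => exact ⟨a, l, rfl⟩
    have hd : pvGetStr it "date" = c := hkey c (by simp) it (by rw [hg]; simp)
    have hrun : ∀ y ∈ run0, (pvGetStr y "date" == c) = true := by
      intro y hy
      have := hkey c (by simp) y (by rw [hg]; simp [hy])
      simp [this]
    have hrest : List.takeWhile (fun x => pvGetStr x "date" == c) (ks.flatMap g) = []
        ∧ List.dropWhile (fun x => pvGetStr x "date" == c) (ks.flatMap g) = ks.flatMap g := by
      cases hks : ks with
      | nil => simp
      | cons c' ks' =>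
        obtain ⟨z, zs, hgz⟩ : ∃ z zs, g c' = z :: zs := by
          cases h : g c' with
          | nil => exact absurd h (hne c' (by simp [hks]))
          | cons a l => exact ⟨a, l, rfl⟩
        have hz : pvGetStr z "date" = c' := hkey c' (by simp [hks]) z (by rw [hgz]; simp)
        have hcc : ¬ (c' = c) := by
          intro h
          exact (List.nodup_cons.mp hnd).1 (by rw [← h, hks]; simp)
        have hzc : ¬ ((pvGetStr z "date" == c) = true) := by simp [hz, hcc]
        rw [List.flatMap_cons, hgz, List.cons_append]
        exact ⟨List.takeWhile_cons_of_neg hzc, List.dropWhile_cons_of_neg hzc⟩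
    rw [List.flatMap_cons, hg, List.cons_append, pvRuns, hd,
        takeWhile_append_all _ _ _ hrun, dropWhile_append_all _ _ _ hrun,
        hrest.1, hrest.2, List.append_nil,
        ih (List.nodup_cons.mp hnd).2 (fun c' h => hne c' (by simp [h]))
           (fun c' h => hkey c' (by simp [h])),
        List.map_cons, hg]

-- A's grouping dict, named for the proofs
def pvG (items : List (List (String × String))) : PySem.Dict String (List (List (String × String))) :=
  items.foldl (fun d it => d.modify (pvGetStr it "date") [] (fun l => l ++ [it])) PySem.Dict.empty

-- A computes keys-sorted-descending with per-key sorted buckets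
theorem A_characterization (items : List (List (String × String))) :
    group_news_by_date items
      = (pvKeys (fun it => pvGetStr it "date") items).map
          (fun c => (c, pvBucket (fun it => pvGetStr it "date") (fun it => pvGetStr it "time") items c)) := by
  have hA : group_news_by_date items
      = (PySem.List.sorted (pvG items).keys (fun c => c) true).foldl
          (fun acc d => acc ++ [(d, PySem.List.sorted ((pvG items).getD d [])
            (fun x => pvGetStr x "time") true)]) [] := rfl
  have hkeys : (pvG items).keys
      = PySem.Set.ofList (items.map (fun it => pvGetStr it "date")) := by
    unfold pvG
    rw [PySem.Dict.keys_foldl_modify_key items (fun it => pvGetStr it "date")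
        ([] : List (List (String × String))) (fun _ it => fun l => l ++ [it]) PySem.Dict.empty,
        PySem.Set.ofList_eq_foldl]
    rfl
  have hget : ∀ c, (pvG items).getD c [] = items.filter (fun it => pvGetStr it "date" == c) := by
    intro c
    have h1 : (items.map (fun it => (pvGetStr it "date", it))).foldl
        (fun d p => d.modify p.1 [] (fun l => l ++ [p.2])) PySem.Dict.empty = pvG items := by
      rw [List.foldl_map]
      rfl
    rw [← h1, PySem.Dict.getD_foldl_modify_append, List.filter_map]
    simp [Function.comp_def, List.map_map]
  rw [hA, hkeys,
      PySem.List.foldl_append_singleton_eq_map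
        (fun d => (d, PySem.List.sorted ((pvG items).getD d []) (fun x => pvGetStr x "time") true)) _ [],
      List.nil_append]
  exact List.map_congr_left (fun c _ => by rw [hget c]; rfl)

-- ===== VERDICT (by name: the statement is the Claim_ definition above) =====
theorem group_news_by_date_spec : Claim_equal_group_news_by_date := by
  intro items _ _
  unfold Spec_group_news_by_date
  rw [A_characterization]
  unfold group_news_by_date_alt
  rw [sorted2_flatMap, pvRuns_flatMap]
  · exact (PySem.List.sorted_perm _ _ _).nodup_iff.mpr (PySem.Set.nodup_ofList _)
  · intro c hc
    exact bucket_ne_nil _ _ _ _ ((mem_keys _ _ _).mp hc)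
  · intro c _ y hy
    exact mem_bucket_key (fun it => pvGetStr it "date") (fun it => pvGetStr it "time") items c y hy
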